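-- pv_equiv track=rewrite | github.com/abelzhou2025/Baoyu | scripts/final_md_pipeline.py | build_image_markers
-- ===== SOURCE A (Python) =====
-- from typing import Dict, List, Tuple
--
-- def normalize_image_count(n: int) -> int:
--     return max(0, min(4, n))
--
-- def image_keys(image_count: int) -> List[str]:
--     c = normalize_image_count(image_count)
--     keys: List[str] = []
--     if c >= 1:
--         keys.append("cover")
--     for i in range(1, c):
--         keys.append(f"figure_{i}")
--     return keys
--
-- def rel_path_for_key(key: str) -> str:
--     if key == "cover":
--         return "images/cover.png"
--     if key.startswith("figure_"):
--         idx = key.split("_")[1]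
--         return f"images/figure-{idx}.png"
--     if key.startswith("deck_"):
--         idx = key.split("_")[1]
--         return f"images/deck-{idx}.png"
--     return f"images/{key}.png"
--
-- def build_image_markers(image_count: int) -> str:
--     keys = image_keys(image_count)
--     lines: List[str] = []
--     for k in keys:
--         if k == "cover":
--             lines.append(f"![封面图]({rel_path_for_key(k)})")
--         else:
--             i = int(k.split("_")[1])
--             lines.append(f"![配图{i}]({rel_path_for_key(k)})")
--     return "\n".join(lines)
-- ===== SOURCE B (Python) =====
-- # Only 5 distinct outputs exist (clamped count 0..4): precompute them once as a
-- # table and make the function a pure clamp-and-index lookup, no loop or join.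
-- _MARKER_TABLE = (
--     "",
--     "![封面图](images/cover.png)",
--     "![封面图](images/cover.png)\n![配图1](images/figure-1.png)",
--     "![封面图](images/cover.png)\n![配图1](images/figure-1.png)\n![配图2](images/figure-2.png)",
--     "![封面图](images/cover.png)\n![配图1](images/figure-1.png)\n![配图2](images/figure-2.png)\n![配图3](images/figure-3.png)",
-- )
--
-- def build_image_markers(image_count: int) -> str:
--     return _MARKER_TABLE[max(0, min(4, image_count))]
-- ===== Notes on version B (the rewrite author's own statement) =====
-- stated objective: alternative
-- what changed: B replaces A's key-list construction, per-key re-parsing (split/int round-trip) and runtime join by a precomputed 5-entry lookup table indexed by the clamped count: the output space is finite, so nothing is built at call time.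
import Mathlib
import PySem

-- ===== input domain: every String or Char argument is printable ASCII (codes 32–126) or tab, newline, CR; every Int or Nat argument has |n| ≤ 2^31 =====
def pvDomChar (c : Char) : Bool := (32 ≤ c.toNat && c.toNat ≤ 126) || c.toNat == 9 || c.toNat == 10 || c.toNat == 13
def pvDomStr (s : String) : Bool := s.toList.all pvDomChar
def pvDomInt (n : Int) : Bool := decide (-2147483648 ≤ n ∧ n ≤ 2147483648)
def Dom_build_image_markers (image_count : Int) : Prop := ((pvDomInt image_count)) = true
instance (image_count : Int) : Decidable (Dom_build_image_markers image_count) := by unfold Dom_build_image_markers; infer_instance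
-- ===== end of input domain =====

-- B replaces A's key-list build + re-parse + join by a precomputed 5-entry lookup table indexed by the clamped count; objective: alternative (no build at call time).

-- ===== PORT A =====
def normalize_image_count (n : Int) : Int := max 0 (min 4 n)

def image_keys (image_count : Int) : List String :=
  let c := normalize_image_count image_count
  let keys : List String := if c ≥ 1 then ["cover"] else []
  (PySem.List.pyRange 1 c 1).foldl (fun ks i => ks ++ ["figure_" ++ PySem.Int.toStr i]) keys

def rel_path_for_key (key : String) : String :=
  if key == "cover" then "images/cover.png"
  else if PySem.Str.startswith key "figure_" then
    -- key.split("_")[1]: index 1 always exists for keys starting with "figure_"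
    let idx := (PySem.List.pyGet? ((PySem.Str.split? key "_").getD []) 1).getD ""
    "images/figure-" ++ idx ++ ".png"
  else if PySem.Str.startswith key "deck_" then
    let idx := (PySem.List.pyGet? ((PySem.Str.split? key "_").getD []) 1).getD ""
    "images/deck-" ++ idx ++ ".png"
  else "images/" ++ key ++ ".png"

def build_image_markers (image_count : Int) : String :=
  let keys := image_keys image_count
  let lines := keys.foldl (fun ls k =>
    if k == "cover" then ls ++ ["![封面图](" ++ rel_path_for_key k ++ ")"]
    else
      -- int(k.split("_")[1]): always a valid digit string on the keys A builds
      let i := (PySem.Int.ofStr? ((PySem.List.pyGet? ((PySem.Str.split? k "_").getD []) 1).getD "")).getD 0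
      ls ++ ["![配图" ++ PySem.Int.toStr i ++ "](" ++ rel_path_for_key k ++ ")"]) []
  PySem.Str.join "\n" lines

-- ===== PORT B =====
-- the precomputed table _MARKER_TABLE of Source B
def markerTable : List String :=
  [ "",
    "![封面图](images/cover.png)",
    "![封面图](images/cover.png)\n![配图1](images/figure-1.png)",
    "![封面图](images/cover.png)\n![配图1](images/figure-1.png)\n![配图2](images/figure-2.png)",
    "![封面图](images/cover.png)\n![配图1](images/figure-1.png)\n![配图2](images/figure-2.png)\n![配图3](images/figure-3.png)" ]

def build_image_markers_alt (image_count : Int) : String :=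
  -- _MARKER_TABLE[max(0, min(4, image_count))]; index is always in 0..4 so the lookup succeeds
  (PySem.List.pyGet? markerTable (max 0 (min 4 image_count))).getD ""

-- ===== PRECONDITION & SPEC =====
def Spec_build_image_markers (image_count : Int) (out : String) : Prop := out = build_image_markers_alt image_count
instance (image_count : Int) (out : String) : Decidable (Spec_build_image_markers image_count out) := by unfold Spec_build_image_markers; infer_instance

-- ===== CLAIM =====
def Claim_equal_build_image_markers : Prop := ∀ (image_count : Int), Dom_build_image_markers image_count → Spec_build_image_markers image_count (build_image_markers image_count)

-- ===== LEMMAS AND PROOFS =====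
-- Both ports depend on the input only through the clamp max 0 (min 4 n) ∈ {0,1,2,3,4}.
lemma clamp_cases (n : Int) :
    max 0 (min 4 n) = 0 ∨ max 0 (min 4 n) = 1 ∨ max 0 (min 4 n) = 2 ∨
    max 0 (min 4 n) = 3 ∨ max 0 (min 4 n) = 4 := by omega

lemma A_eq_B_at (n : Int) : build_image_markers n = build_image_markers_alt n := by
  rcases clamp_cases n with h | h | h | h | h <;>
    simp only [build_image_markers, build_image_markers_alt, image_keys,
      normalize_image_count, h] <;> decide

-- ===== VERDICT =====
theorem build_image_markers_spec : Claim_equal_build_image_markers := by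
  intro n _
  exact A_eq_B_at n
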